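-- pv_equiv track=rewrite | github.com/saurabhpiyush1187/qaassignment | pythonProject/HRank/count_unique.py | totalOperations
-- ===== SOURCE A (Python) =====
-- def totalOperations(st, length):
--     # Dictionary to store characters and their frequencies
--     d = {}
--     for i in range(length):
--
--         # If already contains the character then
--         # increment its frequency by 1
--         if st[i] in d:
--             d[st[i]] += 1
--
--         # Else add the character to the HashMap with frequency 1
--         else:
--             d[st[i]] = 1
--
--     # Set to Store unique frequency
--     valueSet = set()
--
--     # Insert frequencies into HashSet
--     for key in d.keys():
--         valueSet.add(d[key])
--
--         # Count of unique frequencies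
--     return len(valueSet)
-- ===== SOURCE B (Python) =====
-- def totalOperations(st, length):
--     # sort-then-scan: sort the considered characters, walk consecutive runs,
--     # collect the run lengths in a set and return how many distinct ones there are
--     chars = sorted(st[i] for i in range(length))
--     runs = set()
--     while chars:
--         c = chars[0]
--         run = 1
--         while run < len(chars) and chars[run] == c:
--             run += 1
--         runs.add(run)
--         chars = chars[run:]
--     return len(runs)
-- ===== Notes on version B (the rewrite author's own statement) =====
-- stated objective: alternative
-- what changed: B replaces A's dictionary frequency count by sorting the considered characters and scanning consecutive equal runs, collecting run lengths in a set.
import Mathlib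
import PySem

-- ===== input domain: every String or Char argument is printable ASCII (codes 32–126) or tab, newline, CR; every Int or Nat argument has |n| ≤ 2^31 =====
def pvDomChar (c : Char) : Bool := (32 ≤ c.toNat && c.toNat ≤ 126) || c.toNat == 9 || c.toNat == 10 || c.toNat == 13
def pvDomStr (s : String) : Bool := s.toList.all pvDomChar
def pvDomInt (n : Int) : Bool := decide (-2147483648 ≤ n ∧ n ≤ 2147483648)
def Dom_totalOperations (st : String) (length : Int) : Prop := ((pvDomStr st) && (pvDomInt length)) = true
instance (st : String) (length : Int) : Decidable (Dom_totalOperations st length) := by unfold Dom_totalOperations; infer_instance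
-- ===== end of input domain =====

-- B replaces A's hash-count pass by sort-then-scan over consecutive runs (alternative algorithm, same result).

-- ===== PORT A =====
def totalOperations (st : String) (length : Int) : Int :=
  let d := (PySem.List.pyRange 0 length 1).foldl
    (fun d i =>
      let c := PySem.List.pyGetD st.toList i ' '   -- st[i]; Pre_ keeps every index in range
      if d.contains c then d.insert c (d.getD c 0 + 1)
      else d.insert c (1 : Int))
    PySem.Dict.empty
  let valueSet := d.keys.foldl (fun s k => PySem.Set.add s (d.getD k 0)) PySem.Set.empty
  (valueSet.length : Int)

-- ===== PORT B =====
-- the outer while of Source B: take the first character's run, record its length, continue on the remainder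
def pvRuns (chars : List Char) (runs : PySem.Set Int) : PySem.Set Int :=
  match chars with
  | [] => runs
  | c :: rest =>
    -- the inner while advances run while chars[run] == c: run = 1 + length of the equal prefix of rest
    let run : Int := 1 + (rest.takeWhile (fun x => x == c)).length
    -- chars = chars[run:] drops exactly that run, i.e. rest.dropWhile (== c)
    pvRuns (rest.dropWhile (fun x => x == c)) (PySem.Set.add runs run)
termination_by chars.length
decreasing_by simp; exact List.length_dropWhile_le _ _

def totalOperations_alt (st : String) (length : Int) : Int :=
  let chars := PySem.List.sorted ((PySem.List.pyRange 0 length 1).map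
      (fun i => PySem.List.pyGetD st.toList i ' ')) (fun c => c) false
  let runs := pvRuns chars PySem.Set.empty
  (runs.length : Int)

-- ===== PRECONDITION & SPEC =====
-- Pre_ excludes length > len(st), where Python A raises IndexError (negative length returns 0 and is kept).
def Pre_totalOperations (st : String) (length : Int) : Prop := length ≤ (st.toList.length : Int)
instance (st : String) (length : Int) : Decidable (Pre_totalOperations st length) := by unfold Pre_totalOperations; infer_instance
def pvWitness_totalOperations : String × Int := ("aabbbc", 5)

def Spec_totalOperations (st : String) (length : Int) (out : Int) : Prop := out = totalOperations_alt st length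
instance (st : String) (length : Int) (out : Int) : Decidable (Spec_totalOperations st length out) := by unfold Spec_totalOperations; infer_instance

-- ===== CLAIM (what is proved, stated in full; the proofs are below) =====
def Claim_equal_totalOperations : Prop := ∀ (st : String) (length : Int), Dom_totalOperations st length → Pre_totalOperations st length → Spec_totalOperations st length (totalOperations st length)

-- ===== LEMMAS AND PROOFS =====

-- A's branch 'if c in d: d[c] += 1 else: d[c] = 1' is the Counter step
lemma pvStepA_eq (d : PySem.Dict Char Int) (c : Char) :
    (if d.contains c then d.insert c (d.getD c 0 + 1) else d.insert c (1 : Int))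
      = d.insert c (d.getD c 0 + 1) := by
  by_cases h : d.contains c = true
  · simp [h]
  · simp only [Bool.not_eq_true] at h
    simp [h, PySem.Dict.getD_of_not_contains d 0 h]

-- membership in A's value set
lemma pvMemA (L : List Char) (n : Int) :
    n ∈ ((PySem.Dict.counter L).keys.foldl
          (fun s k => PySem.Set.add s ((PySem.Dict.counter L).getD k 0)) PySem.Set.empty)
      ↔ ∃ c ∈ L, (L.count c : Int) = n := by
  rw [← PySem.Set.update_map_eq_foldl_add, PySem.Set.update_empty]
  simp only [PySem.Set.mem_ofList, List.mem_map, PySem.Dict.keys_counter,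
    PySem.Dict.getD_counter, PySem.Set.mem_ofList]

lemma pvNodupA (L : List Char) :
    ((PySem.Dict.counter L).keys.foldl
          (fun s k => PySem.Set.add s ((PySem.Dict.counter L).getD k 0)) PySem.Set.empty).Nodup := by
  rw [← PySem.Set.update_map_eq_foldl_add, PySem.Set.update_empty]
  exact PySem.Set.nodup_ofList _

-- below the run of c's in a sorted list, everything is strictly greater than c
lemma pvDropGt (c : Char) (rest : List Char) (hp : rest.Pairwise (· ≤ ·))
    (hc : ∀ y ∈ rest, c ≤ y) :
    ∀ y ∈ rest.dropWhile (fun x => x == c), c < y := by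
  induction rest with
  | nil => simp
  | cons a tl ih =>
    rw [List.dropWhile_cons]
    by_cases hac : (a == c) = true
    · simp only [hac, if_true]
      exact ih (List.Pairwise.of_cons hp) (fun y hy => hc y (List.mem_cons_of_mem _ hy))
    · simp only [hac, Bool.false_eq_true, if_false]
      intro y hy
      have hca : c < a := lt_of_le_of_ne (hc a List.mem_cons_self)
        (fun h => hac (by simp [h.symm]))
      rcases List.mem_cons.1 hy with rfl | hytl
      · exact hca
      · exact lt_of_lt_of_le hca ((List.pairwise_cons.1 hp).1 y hytl)

-- run lengths of a sorted list are exactly the multiplicities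
lemma pvMemRuns (l : List Char) (s : PySem.Set Int) (n : Int) :
    l.Pairwise (· ≤ ·) → (n ∈ pvRuns l s ↔ n ∈ s ∨ ∃ c ∈ l, (l.count c : Int) = n) := by
  induction l, s using pvRuns.induct with
  | case1 s => intro _; simp [pvRuns]
  | case2 s c rest run ih =>
      intro h
      rw [pvRuns]
      set t := rest.takeWhile (fun x => x == c) with ht
      set dr := rest.dropWhile (fun x => x == c) with hdr
      have hrun : run = 1 + (t.length : Int) := by rw [ht]
      have hsplit : t ++ dr = rest := List.takeWhile_append_dropWhile
      have hcle : ∀ y ∈ rest, c ≤ y := (List.pairwise_cons.1 h).1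
      have hgt : ∀ y ∈ dr, c < y := pvDropGt c rest (List.Pairwise.of_cons h) hcle
      have htc : ∀ x ∈ t, c = x := by
        intro x hx
        rw [ht] at hx
        exact (beq_iff_eq.1 (List.mem_takeWhile_imp (p := fun y => y == c) hx)).symm
      have hdrp : dr.Pairwise (· ≤ ·) :=
        (List.Pairwise.of_cons h).sublist (List.dropWhile_sublist _)
      have hcount_c : ((c :: rest).count c) = t.length + 1 := by
        have h1 : t.count c = t.length := List.count_eq_length.mpr htc
        have h2 : dr.count c = 0 := by
          rw [List.count_eq_zero]
          intro hmem; exact absurd rfl (ne_of_gt (hgt c hmem))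
        rw [List.count_cons_self, ← hsplit, List.count_append, h1, h2]
      have hcount_ne : ∀ x, x ≠ c → ((c :: rest).count x) = dr.count x := by
        intro x hx
        have h1 : t.count x = 0 := by
          rw [List.count_eq_zero]
          intro hmem; exact hx ((htc x hmem).symm)
        rw [List.count_cons_of_ne (Ne.symm hx), ← hsplit, List.count_append, h1, Nat.zero_add]
      rw [ih hdrp]
      simp only [PySem.Set.mem_add]
      constructor
      · rintro (⟨hns | rfl⟩ | ⟨x, hxdr, hxc⟩)
        · exact Or.inl hns
        · refine Or.inr ⟨c, List.mem_cons_self, ?_⟩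
          rw [hcount_c]; push_cast; omega
        · refine Or.inr ⟨x, ?_, ?_⟩
          · exact List.mem_cons_of_mem _ (hsplit ▸ List.mem_append_right t hxdr)
          · rw [hcount_ne x (ne_of_gt (hgt x hxdr))]; exact hxc
      · rintro (hns | ⟨x, hxmem, hxc⟩)
        · exact Or.inl (Or.inl hns)
        · by_cases hxeq : x = c
          · subst hxeq
            refine Or.inl (Or.inr ?_)
            rw [hcount_c] at hxc; push_cast at hxc ⊢; omega
          · have hxdr : x ∈ dr := by
              rcases List.mem_cons.1 hxmem with rfl | hxrest
              · exact absurd rfl hxeq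
              · rcases List.mem_append.1 (hsplit ▸ hxrest) with hxt | hxdr
                · exact absurd ((htc x hxt).symm) hxeq
                · exact hxdr
            refine Or.inr ⟨x, hxdr, ?_⟩
            rw [← hcount_ne x hxeq]; exact hxc

lemma pvNodupRuns (l : List Char) (s : PySem.Set Int) : s.Nodup → (pvRuns l s).Nodup := by
  induction l, s using pvRuns.induct with
  | case1 s => intro hs; simpa [pvRuns] using hs
  | case2 s c rest run ih =>
      intro hs
      rw [pvRuns]
      exact ih (PySem.Set.nodup_add _ _ hs)

-- ===== VERDICT (by name: the statement is the Claim_ definition above) =====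
theorem totalOperations_spec : Claim_equal_totalOperations := by
  intro st length _ _
  unfold Spec_totalOperations totalOperations totalOperations_alt
  simp only []
  set L : List Char := (PySem.List.pyRange 0 length 1).map
      (fun i => PySem.List.pyGetD st.toList i ' ') with hL
  set chars : List Char := PySem.List.sorted L (fun c => c) false with hchars
  have hfold : (PySem.List.pyRange 0 length 1).foldl
      (fun d i =>
        let c := PySem.List.pyGetD st.toList i ' '
        if d.contains c then d.insert c (d.getD c 0 + 1) else d.insert c (1 : Int))
      PySem.Dict.empty = PySem.Dict.counter L := by
    rw [← PySem.Dict.foldl_insert_getD_add_one_eq_counter, hL, List.foldl_map]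
    congr 1
    funext d i
    exact pvStepA_eq d (PySem.List.pyGetD st.toList i ' ')
  rw [hfold]
  have hperm : chars.Perm L := PySem.List.sorted_perm L (fun c => c) false
  have hsorted : chars.Pairwise (· ≤ ·) := PySem.List.sorted_pairwise L (fun c => c)
  have hmemB : ∀ n : Int, n ∈ pvRuns chars PySem.Set.empty ↔ ∃ c ∈ L, (L.count c : Int) = n := by
    intro n
    rw [pvMemRuns chars PySem.Set.empty n hsorted]
    constructor
    · rintro (hns | ⟨c, hc, hcc⟩)
      · exact absurd hns (List.not_mem_nil)
      · exact ⟨c, hperm.mem_iff.1 hc, by rw [← hperm.count_eq]; exact hcc⟩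
    · rintro ⟨c, hc, hcc⟩
      exact Or.inr ⟨c, hperm.mem_iff.2 hc, by rw [hperm.count_eq]; exact hcc⟩
  have hpermSets : (pvRuns chars PySem.Set.empty).Perm
      ((PySem.Dict.counter L).keys.foldl
        (fun s k => PySem.Set.add s ((PySem.Dict.counter L).getD k 0)) PySem.Set.empty) := by
    refine (List.perm_ext_iff_of_nodup ?_ ?_).mpr ?_
    · exact pvNodupRuns chars PySem.Set.empty List.nodup_nil
    · exact pvNodupA L
    · intro n; rw [hmemB n, pvMemA L n]
  exact_mod_cast hpermSets.length_eq.symm
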